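-- pv_equiv track=rewrite | github.com/otengler/CodeBeagle | widgets/SyntaxHighlighter.py | __backSlashesBefore
-- ===== SOURCE A (Python) =====
-- def __backSlashesBefore(line: str, pos: int) -> int:
--     pos -= 1
--     backslashes = 0
--     while pos >= 0:
--         if line[pos] == '\\':
--             backslashes += 1
--             pos -= 1
--         else:
--             break
--     return backslashes
-- ===== SOURCE B (Python) =====
-- def __backSlashesBefore(line: str, pos: int) -> int:
--     s = line[:max(pos, 0)]
--     return len(s) - len(s.rstrip('\\'))
-- ===== Notes on version B (the rewrite author's own statement) =====
-- stated objective: simpler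
-- what changed: Replaces A's backward character-by-character while loop with index arithmetic by slicing the prefix line[:max(pos,0)] and returning len(s) - len(s.rstrip('\')).
-- crash fix: For pos > len(line) A raises IndexError (it indexes line[pos-1]); B clamps the slice and returns the count of trailing backslashes of the whole line. — e.g. on __backSlashesBefore("a\\\\", 5): A raises IndexError, B returns 2
import Mathlib
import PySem

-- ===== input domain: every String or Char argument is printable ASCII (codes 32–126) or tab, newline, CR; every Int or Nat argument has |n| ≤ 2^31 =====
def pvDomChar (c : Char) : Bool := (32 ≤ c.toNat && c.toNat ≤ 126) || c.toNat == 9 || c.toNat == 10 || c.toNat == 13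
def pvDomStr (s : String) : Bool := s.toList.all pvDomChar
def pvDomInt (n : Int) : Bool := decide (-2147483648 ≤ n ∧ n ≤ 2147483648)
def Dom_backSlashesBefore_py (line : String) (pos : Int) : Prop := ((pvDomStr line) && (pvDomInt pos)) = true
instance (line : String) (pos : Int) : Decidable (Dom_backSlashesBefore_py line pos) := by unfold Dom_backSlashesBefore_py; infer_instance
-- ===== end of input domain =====

-- B replaces A's backward index-by-index while loop with a slice + rstrip('\') length difference (simpler, no index arithmetic).

-- ===== PORT A =====
-- the while loop: pos counts down from pos-1 while line[pos] == '\'; termination on (pos + 1).toNat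
def backSlashesBefore_py_go (cs : List Char) (pos : Int) (backslashes : Int) : Int :=
  if _h : pos ≥ 0 then
    match PySem.List.pyGet? cs pos with
    | none => backslashes        -- IndexError in Python; excluded by Pre_
    | some c => if c = '\\' then backSlashesBefore_py_go cs (pos - 1) (backslashes + 1) else backslashes
  else backslashes
termination_by (pos + 1).toNat
decreasing_by omega

def backSlashesBefore_py (line : String) (pos : Int) : Int :=
  backSlashesBefore_py_go line.toList (pos - 1) 0

-- ===== PORT B =====
-- s = line[:max(pos, 0)]; return len(s) - len(s.rstrip('\\'))
-- rstrip('\') ported by hand as dropping trailing '\' via reverse/dropWhile/reverse (exact for this single-char strip set)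
def backSlashesBefore_py_alt (line : String) (pos : Int) : Int :=
  ((PySem.List.slice line.toList none (some (max pos 0))).length : Int) -
    (((PySem.List.slice line.toList none (some (max pos 0))).reverse.dropWhile (· = '\\')).reverse.length : Int)

-- ===== PRECONDITION & SPEC =====
-- Pre_ excludes exactly the inputs where A raises IndexError: pos - 1 beyond the end of line
def Pre_backSlashesBefore_py (line : String) (pos : Int) : Prop := pos ≤ (line.length : Int)
instance (line : String) (pos : Int) : Decidable (Pre_backSlashesBefore_py line pos) := by unfold Pre_backSlashesBefore_py; infer_instance
def pvWitness_backSlashesBefore_py : String × Int := ("a\\\\", 3)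

-- On pos > len(line) A raises IndexError while B clamps the slice and returns the count of trailing backslashes of the whole line.
def Raises_backSlashesBefore_py (line : String) (pos : Int) : Prop := (line.length : Int) < pos
instance (line : String) (pos : Int) : Decidable (Raises_backSlashesBefore_py line pos) := by unfold Raises_backSlashesBefore_py; infer_instance
def pvRaiseWitness_backSlashesBefore_py : String × Int := ("a\\\\", 5)
def pvRaiseWitnessOut_backSlashesBefore_py : Int := 2

def Spec_backSlashesBefore_py (line : String) (pos : Int) (out : Int) : Prop := out = backSlashesBefore_py_alt line pos
instance (line : String) (pos : Int) (out : Int) : Decidable (Spec_backSlashesBefore_py line pos out) := by unfold Spec_backSlashesBefore_py; infer_instance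

-- ===== CLAIM (what is proved, stated in full; the proofs are below) =====
def Claim_equal_backSlashesBefore_py : Prop := ∀ (line : String) (pos : Int), Dom_backSlashesBefore_py line pos → Pre_backSlashesBefore_py line pos → Spec_backSlashesBefore_py line pos (backSlashesBefore_py line pos)
def Claim_raises_backSlashesBefore_py : Prop := (∀ (line : String) (pos : Int), Dom_backSlashesBefore_py line pos → Raises_backSlashesBefore_py line pos → ¬ Pre_backSlashesBefore_py line pos) ∧ (Dom_backSlashesBefore_py (pvRaiseWitness_backSlashesBefore_py.1) (pvRaiseWitness_backSlashesBefore_py.2) ∧ Raises_backSlashesBefore_py (pvRaiseWitness_backSlashesBefore_py.1) (pvRaiseWitness_backSlashesBefore_py.2) ∧ backSlashesBefore_py_alt (pvRaiseWitness_backSlashesBefore_py.1) (pvRaiseWitness_backSlashesBefore_py.2) = pvRaiseWitnessOut_backSlashesBefore_py)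

-- ===== LEMMAS AND PROOFS =====

-- the common characterisation: the number of trailing backslashes of the first n chars
def pvTrail (l : List Char) : Nat := (l.reverse.takeWhile (· = '\\')).length

lemma go_eq_trail (cs : List Char) (n : Nat) (hn : n ≤ cs.length) (acc : Int) :
    backSlashesBefore_py_go cs ((n : Int) - 1) acc = acc + (pvTrail (cs.take n) : Int) := by
  induction n generalizing acc with
  | zero =>
    rw [backSlashesBefore_py_go.eq_def]
    simp [pvTrail]
  | succ m ih =>
    rw [backSlashesBefore_py_go.eq_def]
    have hm : m < cs.length := by omega
    have hget : PySem.List.pyGet? cs ((m + 1 : Nat) - 1 : Int) = some cs[m] := by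
      have : ((m + 1 : Nat) : Int) - 1 = ((m : Nat) : Int) := by push_cast; ring
      rw [this, PySem.List.pyGet?_natCast]
      simp [hm]
    have hpos : ((m + 1 : Nat) : Int) - 1 ≥ 0 := by push_cast; omega
    rw [dif_pos hpos, hget]
    have htake : cs.take (m + 1) = cs.take m ++ [cs[m]] := by
      rw [List.take_add_one, List.getElem?_eq_getElem hm]
      rfl
    by_cases hc : cs[m] = '\\'
    · simp only [if_pos hc]
      have : ((m + 1 : Nat) : Int) - 1 - 1 = ((m : Nat) : Int) - 1 := by push_cast; ring
      rw [this, ih (by omega)]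
      have : pvTrail (cs.take (m + 1)) = pvTrail (cs.take m) + 1 := by
        unfold pvTrail
        rw [htake, List.reverse_append]
        simp [hc]
      rw [this]; push_cast; ring
    · simp only [if_neg hc]
      have : pvTrail (cs.take (m + 1)) = 0 := by
        unfold pvTrail
        rw [htake, List.reverse_append]
        simp [hc]
      rw [this]; push_cast; ring

lemma alt_eq_trail (line : String) (pos : Int) :
    backSlashesBefore_py_alt line pos = (pvTrail (line.toList.take (max pos 0).toNat) : Int) := by
  unfold backSlashesBefore_py_alt
  have h0 : (0 : Int) ≤ max pos 0 := le_max_right _ _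
  rw [PySem.List.slice_to _ h0]
  set s := line.toList.take (max pos 0).toNat with hs
  have hsplit : s.reverse.takeWhile (· = '\\') ++ s.reverse.dropWhile (· = '\\') = s.reverse :=
    List.takeWhile_append_dropWhile
  have hlen : (s.reverse.takeWhile (· = '\\')).length + (s.reverse.dropWhile (· = '\\')).length = s.length := by
    have h := congrArg List.length hsplit
    rw [List.length_append, List.length_reverse] at h
    exact h
  simp only [List.length_reverse, pvTrail]
  omega

-- ===== VERDICT (by name: the statement is the Claim_ definition above) =====
theorem backSlashesBefore_py_spec : Claim_equal_backSlashesBefore_py := by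
  intro line pos _ hpre
  unfold Pre_backSlashesBefore_py at hpre
  unfold Spec_backSlashesBefore_py
  rw [alt_eq_trail]
  unfold backSlashesBefore_py
  by_cases hneg : pos < 0
  · have h1 : pos - 1 < 0 := by omega
    rw [backSlashesBefore_py_go.eq_def, dif_neg (by omega)]
    have : (max pos 0).toNat = 0 := by omega
    simp [this, pvTrail]
  · have hnn : 0 ≤ pos := by omega
    have hmax : (max pos 0).toNat = pos.toNat := by omega
    have hcast : ((pos.toNat : Int)) - 1 = pos - 1 := by omega
    have hle : pos.toNat ≤ line.toList.length := by
      have : line.toList.length = line.length := by simp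
      omega
    rw [← hcast, go_eq_trail line.toList pos.toNat hle 0, hmax]
    ring

@[simp] theorem backSlashesBefore_py_raises : Claim_raises_backSlashesBefore_py := by
  unfold Claim_raises_backSlashesBefore_py
  constructor
  · intro line pos _ hr hp
    exact absurd hp (by unfold Pre_backSlashesBefore_py; unfold Raises_backSlashesBefore_py at hr; omega)
  · exact ⟨by decide, by decide, by decide⟩
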